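-- pv_equiv track=rewrite | github.com/LudoB0/BilanSante | apps/desktop/application-context/application_context_ui.py | create_ui_state
-- ===== SOURCE A (Python) =====
-- from typing import Any, Dict, List
--
-- REQUIRED_UI_FIELDS = (
--     "nom_pharmacie",
--     "adresse",
--     "code_postal",
--     "ville",
--     "telephone",
--     "logo_image",
--     "fournisseur_ia",
--     "cle_api",
-- )
--
-- OPTIONAL_UI_FIELDS = (
--     "site_web",
--     "instagram",
--     "facebook",
--     "x",
--     "linkedin",
-- )
--
-- def _empty_state() -> Dict[str, Any]:
--     state: Dict[str, Any] = {"status": "initial"}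
--     for field in REQUIRED_UI_FIELDS:
--         state[field] = ""
--     for field in OPTIONAL_UI_FIELDS:
--         state[field] = ""
--     return state
--
-- def create_ui_state(existing: Dict[str, Any] | None = None) -> Dict[str, Any]:
--     state = _empty_state()
--     if existing:
--         for key, value in existing.items():
--             if key in state and key != "status":
--                 state[key] = value
--         state["status"] = "edition"
--     return state
-- ===== SOURCE B (Python) =====
-- REQUIRED_UI_FIELDS = (
--     "nom_pharmacie",
--     "adresse",
--     "code_postal",
--     "ville",
--     "telephone",
--     "logo_image",
--     "fournisseur_ia",
--     "cle_api",
-- )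
--
-- OPTIONAL_UI_FIELDS = (
--     "site_web",
--     "instagram",
--     "facebook",
--     "x",
--     "linkedin",
-- )
--
-- ALL_FIELDS = REQUIRED_UI_FIELDS + OPTIONAL_UI_FIELDS
--
--
-- def create_ui_state(existing=None):
--     if existing:
--         return {"status": "edition", **{f: existing.get(f, "") for f in ALL_FIELDS}}
--     return {"status": "initial", **{f: "" for f in ALL_FIELDS}}
-- ===== Notes on version B (the rewrite author's own statement) =====
-- stated objective: simpler
-- what changed: Instead of building a mutable default dict and looping over existing.items() to overwrite schema keys in place, B builds the result directly in one dict comprehension over the fixed schema ALL_FIELDS, looking each field up with existing.get(field, ""), with status decided up front.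
import Mathlib
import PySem

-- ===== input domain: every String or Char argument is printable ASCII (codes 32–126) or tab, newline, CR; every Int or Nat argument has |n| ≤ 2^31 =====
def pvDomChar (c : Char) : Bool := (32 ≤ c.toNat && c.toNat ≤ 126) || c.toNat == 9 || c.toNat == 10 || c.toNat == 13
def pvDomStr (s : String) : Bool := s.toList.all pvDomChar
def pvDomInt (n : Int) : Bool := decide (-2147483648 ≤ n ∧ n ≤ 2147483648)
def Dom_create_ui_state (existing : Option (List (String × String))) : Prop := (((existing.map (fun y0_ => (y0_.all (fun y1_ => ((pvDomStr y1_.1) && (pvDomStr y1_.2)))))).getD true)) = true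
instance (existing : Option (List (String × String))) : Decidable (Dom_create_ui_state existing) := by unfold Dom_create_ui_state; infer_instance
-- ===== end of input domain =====

-- B builds the result directly over the fixed schema with a lookup per field instead of
-- mutating a default dict while looping over existing.items() (objective: simpler).

-- ===== PORT A =====
def pvRequired : List String :=
  ["nom_pharmacie", "adresse", "code_postal", "ville",
   "telephone", "logo_image", "fournisseur_ia", "cle_api"]

def pvOptional : List String :=
  ["site_web", "instagram", "facebook", "x", "linkedin"]

def pvEmptyState : PySem.Dict String String :=
  let state := PySem.Dict.insert PySem.Dict.empty "status" "initial"
  let state := pvRequired.foldl (fun st f => st.insert f "") state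
  pvOptional.foldl (fun st f => st.insert f "") state

def create_ui_state (existing : Option (List (String × String))) : List (String × String) :=
  let state := pvEmptyState
  match existing with
  | none => state.items
  | some l =>
    if l.isEmpty then state.items
    else
      let state := l.foldl
        (fun st kv => if st.contains kv.1 && kv.1 != "status" then st.insert kv.1 kv.2 else st)
        state
      (state.insert "status" "edition").items

-- ===== PORT B =====
def pvAllFields : List String := pvRequired ++ pvOptional

def create_ui_state_alt (existing : Option (List (String × String))) : List (String × String) :=
  match existing with
  | some l =>
    if l.isEmpty then
      ("status", "initial") :: pvAllFields.map (fun f => (f, ""))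
    else
      ("status", "edition") :: pvAllFields.map (fun f => (f, (PySem.Dict.mk l).getD f ""))
  | none => ("status", "initial") :: pvAllFields.map (fun f => (f, ""))

-- ===== PRECONDITION & SPEC =====
-- Pre_ excludes association lists with duplicate keys: a Python dict cannot contain them, so
-- which of the duplicated values the encoding keeps (A's port keeps the last, B's first-match
-- lookup the first) is an accident of the assoc-list encoding, not of either program.
def Pre_create_ui_state (existing : Option (List (String × String))) : Prop :=
  ((existing.getD []).map Prod.fst).Nodup
instance (existing : Option (List (String × String))) : Decidable (Pre_create_ui_state existing) := by
  unfold Pre_create_ui_state; infer_instance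

def pvWitness_create_ui_state : (Option (List (String × String))) :=
  some [("ville", "Paris"), ("junk", "x")]

def Spec_create_ui_state (existing : Option (List (String × String))) (out : List (String × String)) : Prop := out = create_ui_state_alt existing
instance (existing : Option (List (String × String))) (out : List (String × String)) : Decidable (Spec_create_ui_state existing out) := by unfold Spec_create_ui_state; infer_instance

-- ===== CLAIM (what is proved, stated in full; the proofs are below) =====
def Claim_equal_create_ui_state : Prop := ∀ (existing : Option (List (String × String))), Dom_create_ui_state existing → Pre_create_ui_state existing → Spec_create_ui_state existing (create_ui_state existing)

-- ===== LEMMAS AND PROOFS =====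

-- the loop body of A's port, named for the lemmas
def pvStep (st : PySem.Dict String String) (kv : String × String) : PySem.Dict String String :=
  if st.contains kv.1 && kv.1 != "status" then st.insert kv.1 kv.2 else st

lemma pvFold_eq (l : List (String × String)) (d : PySem.Dict String String) :
    l.foldl (fun st kv => if st.contains kv.1 && kv.1 != "status" then st.insert kv.1 kv.2 else st) d
      = l.foldl pvStep d := rfl

-- A's loop never changes the key list (it inserts only keys that are already present)
lemma pvFold_keys (l : List (String × String)) (d : PySem.Dict String String) :
    (l.foldl pvStep d).keys = d.keys := by
  induction l generalizing d with
  | nil => rfl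
  | cons kv t ih =>
    simp only [List.foldl_cons, pvStep]
    split_ifs with h
    · rw [Bool.and_eq_true] at h
      rw [ih, PySem.Dict.keys_insert_of_contains _ _ h.1]
    · exact ih d

-- keys not occurring in l are untouched by A's loop
lemma pvFold_get?_notmem (l : List (String × String)) (d : PySem.Dict String String)
    (k : String) (hk : k ∉ l.map Prod.fst) :
    (l.foldl pvStep d).get? k = d.get? k := by
  induction l generalizing d with
  | nil => rfl
  | cons kv t ih =>
    simp only [List.map_cons, List.mem_cons, not_or] at hk
    simp only [List.foldl_cons, pvStep]
    split_ifs with h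
    · rw [ih _ hk.2, PySem.Dict.get?_insert_of_ne _ _ hk.1]
    · exact ih d hk.2

-- on a duplicate-free l, A's loop leaves key k at the first (= only) value l carries for it,
-- falling back to d's value when l does not mention k
lemma pvFold_getD (l : List (String × String)) (d : PySem.Dict String String)
    (k : String) (dfl : String) (hc : d.contains k = true) (hs : k ≠ "status")
    (hnd : (l.map Prod.fst).Nodup) :
    (l.foldl pvStep d).getD k dfl = (PySem.Dict.mk l).getD k (d.getD k dfl) := by
  induction l generalizing d with
  | nil => rfl
  | cons kv t ih =>
    simp only [List.map_cons, List.nodup_cons] at hnd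
    by_cases hek : kv.1 = k
    · subst hek
      simp only [List.foldl_cons, pvStep, hc, Bool.true_and]
      have hne : (kv.1 != "status") = true := by simp [hs]
      rw [if_pos hne]
      rw [PySem.Dict.getD_eq_get?_getD, pvFold_get?_notmem _ _ _ hnd.1,
          PySem.Dict.get?_insert_self]
      rw [PySem.Dict.getD_eq_get?_getD, PySem.Dict.get?_mk_cons]
      simp
    · have hbek : (kv.1 == k) = false := by simp [hek]
      have step_eq : pvStep d kv = d ∨ pvStep d kv = d.insert kv.1 kv.2 := by
        unfold pvStep; split_ifs <;> simp
      have hc' : (pvStep d kv).contains k = true := by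
        rcases step_eq with h | h <;> rw [h]
        · exact hc
        · rw [PySem.Dict.contains_insert]
          simp [hc]
      have hgd : (pvStep d kv).getD k dfl = d.getD k dfl := by
        rcases step_eq with h | h <;> rw [h]
        · exact PySem.Dict.getD_insert_of_ne _ _ _ (Ne.symm hek)
      rw [List.foldl_cons, ih _ hc' hnd.2, hgd,
          PySem.Dict.getD_eq_get?_getD, PySem.Dict.getD_eq_get?_getD (PySem.Dict.mk (kv :: t)),
          PySem.Dict.get?_mk_cons, if_neg (by simp [hbek])]

lemma pvBase_keys : pvEmptyState.keys = "status" :: pvAllFields := by decide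

lemma pvBase_facts : ∀ k ∈ pvAllFields,
    k ≠ "status" ∧ pvEmptyState.contains k = true ∧ pvEmptyState.getD k "" = "" := by decide

-- the truthy branch: items of A's final dict coincide with B's schema-driven list
lemma pvMain (l : List (String × String)) (hne : l.isEmpty = false)
    (hnd : (l.map Prod.fst).Nodup) :
    create_ui_state (some l) = create_ui_state_alt (some l) := by
  simp only [create_ui_state, create_ui_state_alt, hne, Bool.false_eq_true, if_false, pvFold_eq]
  set D := l.foldl pvStep pvEmptyState with hD
  have hkeys : D.keys = "status" :: pvAllFields := by rw [hD, pvFold_keys, pvBase_keys]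
  have hDc : D.contains "status" = true := by
    rw [PySem.Dict.contains_iff_mem_keys, hkeys]; exact List.mem_cons_self ..
  have hEkeys : (D.insert "status" "edition").keys = "status" :: pvAllFields := by
    rw [PySem.Dict.keys_insert_of_contains _ _ hDc, hkeys]
  have hEnodup : (D.insert "status" "edition").keys.Nodup := by
    rw [hEkeys]; decide
  rw [PySem.Dict.items_eq_map_keys _ hEnodup "", hEkeys, List.map_cons]
  congr 1
  · rw [PySem.Dict.getD_insert_self]
  · apply List.map_congr_left
    intro k hk
    obtain ⟨hks, hkc, hkd⟩ := pvBase_facts k hk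
    rw [PySem.Dict.getD_insert_of_ne _ _ _ hks, hD, pvFold_getD l _ k "" hkc hks hnd, hkd]

-- ===== VERDICT (by name: the statement is the Claim_ definition above) =====
theorem create_ui_state_spec : Claim_equal_create_ui_state := by
  intro existing _ hpre
  unfold Spec_create_ui_state
  match existing with
  | none => rfl
  | some l =>
    cases he : l.isEmpty with
    | true =>
      rw [List.isEmpty_iff.mp he]; rfl
    | false =>
      exact pvMain l he hpre
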